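-- pv_equiv track=rewrite | github.com/pypi-data/pypi-mirror-397 | packages/phonofix/phonofix-0.3.0.tar.gz/phonofix-0.3.0/src/phonofix/languages/chinese/utils.py | extract_initial_final
-- ===== SOURCE A (Python) =====
-- def extract_initial_final(pinyin_str):
--     """
--     提取拼音的聲母與韻母
--
--     Args:
--         pinyin_str: 拼音字串 (如 "zhang")
--
--     Returns:
--         (str, str): (聲母, 韻母)
--         範例: "zhang" -> ("zh", "ang"), "an" -> ("", "an")
--     """
--     if not pinyin_str:
--         return "", ""
--     # 聲母列表 (注意順序: 雙字符聲母優先匹配)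
--     initials = [
--         'zh', 'ch', 'sh',
--         'b', 'p', 'm', 'f', 'd', 't', 'n', 'l',
--         'g', 'k', 'h', 'j', 'q', 'x',
--         'z', 'c', 's', 'r', 'y', 'w'
--     ]
--     for initial in initials:
--         if pinyin_str.startswith(initial):
--             final = pinyin_str[len(initial):]
--             return initial, final
--     # 若無匹配聲母，則視為零聲母，整個字串為韻母
--     return "", pinyin_str
-- ===== SOURCE B (Python) =====
-- _SINGLE_LEN = {c: 1 for c in "bpmfdtnlgkhjqxzcsryw"}
--
-- def extract_initial_final(pinyin_str):
--     """
--     提取拼音的聲母與韻母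
--
--     Compute the split index first (0, 1 or 2 chars of initial), then slice once:
--     a table keyed by the first character gives the base length, bumped to 2 for
--     the retroflex digraphs zh/ch/sh.
--     """
--     n = _SINGLE_LEN.get(pinyin_str[:1], 0)
--     if n == 1 and pinyin_str[:1] in ("z", "c", "s") and pinyin_str[1:2] == "h":
--         n = 2
--     return pinyin_str[:n], pinyin_str[n:]
-- ===== Notes on version B (the rewrite author's own statement) =====
-- stated objective: alternative
-- what changed: Instead of scanning an ordered 23-element candidate list with startswith and returning at the first match, B computes a split index (0/1/2) from a table keyed by the first character (bumped to 2 for the zh/ch/sh digraphs) and performs a single slice at that index.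
import Mathlib
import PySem

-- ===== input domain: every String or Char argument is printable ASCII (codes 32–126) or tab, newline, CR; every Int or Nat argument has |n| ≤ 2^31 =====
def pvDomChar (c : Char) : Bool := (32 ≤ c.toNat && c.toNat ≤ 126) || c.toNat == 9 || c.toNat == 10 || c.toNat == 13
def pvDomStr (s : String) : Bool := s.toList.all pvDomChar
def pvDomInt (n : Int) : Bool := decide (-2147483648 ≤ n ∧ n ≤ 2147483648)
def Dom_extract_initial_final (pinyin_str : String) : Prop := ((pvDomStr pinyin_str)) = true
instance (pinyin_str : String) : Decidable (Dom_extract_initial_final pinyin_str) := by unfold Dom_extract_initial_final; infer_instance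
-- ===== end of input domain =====

-- B replaces A's ordered scan over the 23-element initials list (return at first
-- startswith match) with computing a split index 0/1/2 from a table keyed by the
-- first character, then slicing once (alternative decomposition; same behaviour).

-- ===== PORT A =====
def pvInitialsA : List String :=
  ["zh", "ch", "sh",
   "b", "p", "m", "f", "d", "t", "n", "l",
   "g", "k", "h", "j", "q", "x",
   "z", "c", "s", "r", "y", "w"]

def pvLoopA (s : String) : List String → String × String
  | [] => ("", s)
  | i :: rest =>
      if PySem.Str.startswith s i then
        (i, PySem.Str.slice s (some (PySem.Str.len i)) none)
      else pvLoopA s rest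

def extract_initial_final (pinyin_str : String) : String × String :=
  if pinyin_str = "" then ("", "")
  else pvLoopA pinyin_str pvInitialsA

-- ===== PORT B =====
-- {c: 1 for c in "bpmfdtnlgkhjqxzcsryw"}  (keys are one-char strings, as in Python)
def pvSingleLen : PySem.Dict String Int :=
  PySem.Dict.ofList
    [("b",1),("p",1),("m",1),("f",1),("d",1),("t",1),("n",1),("l",1),
     ("g",1),("k",1),("h",1),("j",1),("q",1),("x",1),
     ("z",1),("c",1),("s",1),("r",1),("y",1),("w",1)]

def extract_initial_final_alt (pinyin_str : String) : String × String :=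
  let head := PySem.Str.slice pinyin_str none (some 1)
  let n0 := pvSingleLen.getD head 0
  let n : Int :=
    if n0 = 1 ∧ (head = "z" ∨ head = "c" ∨ head = "s") ∧
        PySem.Str.slice pinyin_str (some 1) (some 2) = "h"
    then 2 else n0
  (PySem.Str.slice pinyin_str none (some n), PySem.Str.slice pinyin_str (some n) none)

-- ===== PRECONDITION & SPEC =====
def Spec_extract_initial_final (pinyin_str : String) (out : String × String) : Prop := out = extract_initial_final_alt pinyin_str
instance (pinyin_str : String) (out : String × String) : Decidable (Spec_extract_initial_final pinyin_str out) := by unfold Spec_extract_initial_final; infer_instance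

-- ===== CLAIM (what is proved, stated in full; the proofs are below) =====
def Claim_equal_extract_initial_final : Prop := ∀ (pinyin_str : String), Dom_extract_initial_final pinyin_str → Spec_extract_initial_final pinyin_str (extract_initial_final pinyin_str)

-- ===== LEMMAS AND PROOFS =====
-- startswith as an equality on the prefix of the right length
lemma pv_swc (l p : List Char) :
    PySem.Chars.startswith l p = decide (l.take p.length = p) := by
  by_cases hp : p <+: l
  · simp only [(PySem.Chars.startswith_iff _ _).mpr hp, true_eq_decide_iff]
    exact ((List.prefix_iff_eq_take).mp hp).symm
  · have h1 : PySem.Chars.startswith l p = false := by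
      rw [← Bool.not_eq_true, PySem.Chars.startswith_iff]; exact hp
    have h2 : ¬ l.take p.length = p :=
      fun h => hp (List.prefix_iff_eq_take.mpr h.symm)
    simp only [h1, false_eq_decide_iff]; exact h2

-- s[:n] = t as an equality on the prefix of s (n = 2, 1)
lemma pv_slice2_iff (s t : String) :
    (PySem.Str.slice s none (some 2) = t) ↔ s.toList.take 2 = t.toList := by
  rw [← String.toList_inj, PySem.Str.toList_slice, PySem.Chars.slice_eq_listSlice]
  rw [show ((2:Int)) = ((2:Nat):Int) by norm_num, PySem.List.slice_to_natCast]

lemma pv_slice2_iff' (s t : String) :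
    (t = PySem.Str.slice s none (some 2)) ↔ s.toList.take 2 = t.toList := by
  rw [eq_comm, pv_slice2_iff]

lemma pv_slice1_iff (s t : String) :
    (PySem.Str.slice s none (some 1) = t) ↔ s.toList.take 1 = t.toList := by
  rw [← String.toList_inj, PySem.Str.toList_slice, PySem.Chars.slice_eq_listSlice]
  rw [show ((1:Int)) = ((1:Nat):Int) by norm_num, PySem.List.slice_to_natCast]

lemma pv_slice1_iff' (s t : String) :
    (t = PySem.Str.slice s none (some 1)) ↔ s.toList.take 1 = t.toList := by
  rw [eq_comm, pv_slice1_iff]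

-- s[1:2] = "h" as an equality on the second character
lemma pv_slice12_iff (s : String) :
    (PySem.Str.slice s (some 1) (some 2) = "h") ↔ (s.toList.drop 1).take 1 = ['h'] := by
  rw [← String.toList_inj, PySem.Str.toList_slice, PySem.Chars.slice_eq_listSlice]
  rw [show ((1:Int)) = ((1:Nat):Int) by norm_num, show ((2:Int)) = ((2:Nat):Int) by norm_num,
    PySem.List.slice_natCast]
  simp

-- a 2-char prefix equality splits into first- and second-char equalities
lemma pv_take2_split (l : List Char) (a b : Char) :
    l.take 2 = [a, b] ↔ l.take 1 = [a] ∧ (l.drop 1).take 1 = [b] := by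
  match l with
  | [] => simp
  | [x] => simp
  | x :: y :: t => simp [List.take]

-- s[:0] and s[0:]
lemma pv_slice_to0 (s : String) : PySem.Str.slice s none (some 0) = "" := by
  rw [← String.toList_inj, PySem.Str.toList_slice, PySem.Chars.slice_eq_listSlice]
  rw [show ((0:Int)) = ((0:Nat):Int) by norm_num, PySem.List.slice_to_natCast]
  simp

lemma pv_slice_from0 (s : String) : PySem.Str.slice s (some 0) none = s := by
  rw [← String.toList_inj, PySem.Str.toList_slice, PySem.Chars.slice_eq_listSlice]
  rw [show ((0:Int)) = ((0:Nat):Int) by norm_num, PySem.List.slice_from_natCast]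
  simp

-- the dict comprehension has distinct keys, so ofList is the literal dict
lemma pvSingleLen_mk : pvSingleLen = PySem.Dict.mk
    [("b",1),("p",1),("m",1),("f",1),("d",1),("t",1),("n",1),("l",1),
     ("g",1),("k",1),("h",1),("j",1),("q",1),("x",1),
     ("z",1),("c",1),("s",1),("r",1),("y",1),("w",1)] := by decide

-- ===== VERDICT (by name: the statement is the Claim_ definition above) =====
set_option maxHeartbeats 3200000 in
theorem extract_initial_final_spec : Claim_equal_extract_initial_final := by
  intro s _
  unfold Spec_extract_initial_final extract_initial_final extract_initial_final_alt
  by_cases h0 : s = ""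
  · subst h0; decide
  · rw [if_neg h0]
    by_cases hh : s.toList.tail.take 1 = ['h']
    all_goals (
      by_cases h_z : s.toList.take 1 = ['z']
      · simp [pvInitialsA, pvLoopA, pvSingleLen_mk, PySem.Dict.getD, PySem.Dict.get?_mk_cons, PySem.Dict.get?, beq_iff_eq, PySem.Str.len, pv_swc, pv_slice1_iff, pv_slice1_iff', pv_slice2_iff, pv_slice2_iff', pv_slice12_iff, pv_take2_split, pv_slice_to0, pv_slice_from0, hh, h_z]
      by_cases h_c : s.toList.take 1 = ['c']
      · simp [pvInitialsA, pvLoopA, pvSingleLen_mk, PySem.Dict.getD, PySem.Dict.get?_mk_cons, PySem.Dict.get?, beq_iff_eq, PySem.Str.len, pv_swc, pv_slice1_iff, pv_slice1_iff', pv_slice2_iff, pv_slice2_iff', pv_slice12_iff, pv_take2_split, pv_slice_to0, pv_slice_from0, hh, h_z, h_c]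
      by_cases h_s : s.toList.take 1 = ['s']
      · simp [pvInitialsA, pvLoopA, pvSingleLen_mk, PySem.Dict.getD, PySem.Dict.get?_mk_cons, PySem.Dict.get?, beq_iff_eq, PySem.Str.len, pv_swc, pv_slice1_iff, pv_slice1_iff', pv_slice2_iff, pv_slice2_iff', pv_slice12_iff, pv_take2_split, pv_slice_to0, pv_slice_from0, hh, h_z, h_c, h_s]
      by_cases h_b : s.toList.take 1 = ['b']
      · simp [pvInitialsA, pvLoopA, pvSingleLen_mk, PySem.Dict.getD, PySem.Dict.get?_mk_cons, PySem.Dict.get?, beq_iff_eq, PySem.Str.len, pv_swc, pv_slice1_iff, pv_slice1_iff', pv_slice2_iff, pv_slice2_iff', pv_slice12_iff, pv_take2_split, pv_slice_to0, pv_slice_from0, hh, h_z, h_c, h_s, h_b]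
      by_cases h_p : s.toList.take 1 = ['p']
      · simp [pvInitialsA, pvLoopA, pvSingleLen_mk, PySem.Dict.getD, PySem.Dict.get?_mk_cons, PySem.Dict.get?, beq_iff_eq, PySem.Str.len, pv_swc, pv_slice1_iff, pv_slice1_iff', pv_slice2_iff, pv_slice2_iff', pv_slice12_iff, pv_take2_split, pv_slice_to0, pv_slice_from0, hh, h_z, h_c, h_s, h_b, h_p]
      by_cases h_m : s.toList.take 1 = ['m']
      · simp [pvInitialsA, pvLoopA, pvSingleLen_mk, PySem.Dict.getD, PySem.Dict.get?_mk_cons, PySem.Dict.get?, beq_iff_eq, PySem.Str.len, pv_swc, pv_slice1_iff, pv_slice1_iff', pv_slice2_iff, pv_slice2_iff', pv_slice12_iff, pv_take2_split, pv_slice_to0, pv_slice_from0, hh, h_z, h_c, h_s, h_b, h_p, h_m]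
      by_cases h_f : s.toList.take 1 = ['f']
      · simp [pvInitialsA, pvLoopA, pvSingleLen_mk, PySem.Dict.getD, PySem.Dict.get?_mk_cons, PySem.Dict.get?, beq_iff_eq, PySem.Str.len, pv_swc, pv_slice1_iff, pv_slice1_iff', pv_slice2_iff, pv_slice2_iff', pv_slice12_iff, pv_take2_split, pv_slice_to0, pv_slice_from0, hh, h_z, h_c, h_s, h_b, h_p, h_m, h_f]
      by_cases h_d : s.toList.take 1 = ['d']
      · simp [pvInitialsA, pvLoopA, pvSingleLen_mk, PySem.Dict.getD, PySem.Dict.get?_mk_cons, PySem.Dict.get?, beq_iff_eq, PySem.Str.len, pv_swc, pv_slice1_iff, pv_slice1_iff', pv_slice2_iff, pv_slice2_iff', pv_slice12_iff, pv_take2_split, pv_slice_to0, pv_slice_from0, hh, h_z, h_c, h_s, h_b, h_p, h_m, h_f, h_d]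
      by_cases h_t : s.toList.take 1 = ['t']
      · simp [pvInitialsA, pvLoopA, pvSingleLen_mk, PySem.Dict.getD, PySem.Dict.get?_mk_cons, PySem.Dict.get?, beq_iff_eq, PySem.Str.len, pv_swc, pv_slice1_iff, pv_slice1_iff', pv_slice2_iff, pv_slice2_iff', pv_slice12_iff, pv_take2_split, pv_slice_to0, pv_slice_from0, hh, h_z, h_c, h_s, h_b, h_p, h_m, h_f, h_d, h_t]
      by_cases h_n : s.toList.take 1 = ['n']
      · simp [pvInitialsA, pvLoopA, pvSingleLen_mk, PySem.Dict.getD, PySem.Dict.get?_mk_cons, PySem.Dict.get?, beq_iff_eq, PySem.Str.len, pv_swc, pv_slice1_iff, pv_slice1_iff', pv_slice2_iff, pv_slice2_iff', pv_slice12_iff, pv_take2_split, pv_slice_to0, pv_slice_from0, hh, h_z, h_c, h_s, h_b, h_p, h_m, h_f, h_d, h_t, h_n]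
      by_cases h_l : s.toList.take 1 = ['l']
      · simp [pvInitialsA, pvLoopA, pvSingleLen_mk, PySem.Dict.getD, PySem.Dict.get?_mk_cons, PySem.Dict.get?, beq_iff_eq, PySem.Str.len, pv_swc, pv_slice1_iff, pv_slice1_iff', pv_slice2_iff, pv_slice2_iff', pv_slice12_iff, pv_take2_split, pv_slice_to0, pv_slice_from0, hh, h_z, h_c, h_s, h_b, h_p, h_m, h_f, h_d, h_t, h_n, h_l]
      by_cases h_g : s.toList.take 1 = ['g']
      · simp [pvInitialsA, pvLoopA, pvSingleLen_mk, PySem.Dict.getD, PySem.Dict.get?_mk_cons, PySem.Dict.get?, beq_iff_eq, PySem.Str.len, pv_swc, pv_slice1_iff, pv_slice1_iff', pv_slice2_iff, pv_slice2_iff', pv_slice12_iff, pv_take2_split, pv_slice_to0, pv_slice_from0, hh, h_z, h_c, h_s, h_b, h_p, h_m, h_f, h_d, h_t, h_n, h_l, h_g]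
      by_cases h_k : s.toList.take 1 = ['k']
      · simp [pvInitialsA, pvLoopA, pvSingleLen_mk, PySem.Dict.getD, PySem.Dict.get?_mk_cons, PySem.Dict.get?, beq_iff_eq, PySem.Str.len, pv_swc, pv_slice1_iff, pv_slice1_iff', pv_slice2_iff, pv_slice2_iff', pv_slice12_iff, pv_take2_split, pv_slice_to0, pv_slice_from0, hh, h_z, h_c, h_s, h_b, h_p, h_m, h_f, h_d, h_t, h_n, h_l, h_g, h_k]
      by_cases h_h : s.toList.take 1 = ['h']
      · simp [pvInitialsA, pvLoopA, pvSingleLen_mk, PySem.Dict.getD, PySem.Dict.get?_mk_cons, PySem.Dict.get?, beq_iff_eq, PySem.Str.len, pv_swc, pv_slice1_iff, pv_slice1_iff', pv_slice2_iff, pv_slice2_iff', pv_slice12_iff, pv_take2_split, pv_slice_to0, pv_slice_from0, hh, h_z, h_c, h_s, h_b, h_p, h_m, h_f, h_d, h_t, h_n, h_l, h_g, h_k, h_h]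
      by_cases h_j : s.toList.take 1 = ['j']
      · simp [pvInitialsA, pvLoopA, pvSingleLen_mk, PySem.Dict.getD, PySem.Dict.get?_mk_cons, PySem.Dict.get?, beq_iff_eq, PySem.Str.len, pv_swc, pv_slice1_iff, pv_slice1_iff', pv_slice2_iff, pv_slice2_iff', pv_slice12_iff, pv_take2_split, pv_slice_to0, pv_slice_from0, hh, h_z, h_c, h_s, h_b, h_p, h_m, h_f, h_d, h_t, h_n, h_l, h_g, h_k, h_h, h_j]
      by_cases h_q : s.toList.take 1 = ['q']
      · simp [pvInitialsA, pvLoopA, pvSingleLen_mk, PySem.Dict.getD, PySem.Dict.get?_mk_cons, PySem.Dict.get?, beq_iff_eq, PySem.Str.len, pv_swc, pv_slice1_iff, pv_slice1_iff', pv_slice2_iff, pv_slice2_iff', pv_slice12_iff, pv_take2_split, pv_slice_to0, pv_slice_from0, hh, h_z, h_c, h_s, h_b, h_p, h_m, h_f, h_d, h_t, h_n, h_l, h_g, h_k, h_h, h_j, h_q]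
      by_cases h_x : s.toList.take 1 = ['x']
      · simp [pvInitialsA, pvLoopA, pvSingleLen_mk, PySem.Dict.getD, PySem.Dict.get?_mk_cons, PySem.Dict.get?, beq_iff_eq, PySem.Str.len, pv_swc, pv_slice1_iff, pv_slice1_iff', pv_slice2_iff, pv_slice2_iff', pv_slice12_iff, pv_take2_split, pv_slice_to0, pv_slice_from0, hh, h_z, h_c, h_s, h_b, h_p, h_m, h_f, h_d, h_t, h_n, h_l, h_g, h_k, h_h, h_j, h_q, h_x]
      by_cases h_r : s.toList.take 1 = ['r']
      · simp [pvInitialsA, pvLoopA, pvSingleLen_mk, PySem.Dict.getD, PySem.Dict.get?_mk_cons, PySem.Dict.get?, beq_iff_eq, PySem.Str.len, pv_swc, pv_slice1_iff, pv_slice1_iff', pv_slice2_iff, pv_slice2_iff', pv_slice12_iff, pv_take2_split, pv_slice_to0, pv_slice_from0, hh, h_z, h_c, h_s, h_b, h_p, h_m, h_f, h_d, h_t, h_n, h_l, h_g, h_k, h_h, h_j, h_q, h_x, h_r]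
      by_cases h_y : s.toList.take 1 = ['y']
      · simp [pvInitialsA, pvLoopA, pvSingleLen_mk, PySem.Dict.getD, PySem.Dict.get?_mk_cons, PySem.Dict.get?, beq_iff_eq, PySem.Str.len, pv_swc, pv_slice1_iff, pv_slice1_iff', pv_slice2_iff, pv_slice2_iff', pv_slice12_iff, pv_take2_split, pv_slice_to0, pv_slice_from0, hh, h_z, h_c, h_s, h_b, h_p, h_m, h_f, h_d, h_t, h_n, h_l, h_g, h_k, h_h, h_j, h_q, h_x, h_r, h_y]
      by_cases h_w : s.toList.take 1 = ['w']
      · simp [pvInitialsA, pvLoopA, pvSingleLen_mk, PySem.Dict.getD, PySem.Dict.get?_mk_cons, PySem.Dict.get?, beq_iff_eq, PySem.Str.len, pv_swc, pv_slice1_iff, pv_slice1_iff', pv_slice2_iff, pv_slice2_iff', pv_slice12_iff, pv_take2_split, pv_slice_to0, pv_slice_from0, hh, h_z, h_c, h_s, h_b, h_p, h_m, h_f, h_d, h_t, h_n, h_l, h_g, h_k, h_h, h_j, h_q, h_x, h_r, h_y, h_w]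
      simp [pvInitialsA, pvLoopA, pvSingleLen_mk, PySem.Dict.getD, PySem.Dict.get?_mk_cons, PySem.Dict.get?, beq_iff_eq, PySem.Str.len, pv_swc, pv_slice1_iff, pv_slice1_iff', pv_slice2_iff, pv_slice2_iff', pv_slice12_iff, pv_take2_split, pv_slice_to0, pv_slice_from0, hh, h_z, h_c, h_s, h_b, h_p, h_m, h_f, h_d, h_t, h_n, h_l, h_g, h_k, h_h, h_j, h_q, h_x, h_r, h_y, h_w])
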